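-- pv_equiv track=rewrite | github.com/radustefannicolae/cripto | TEMA_DE_CURS_1_ENGLEZA.py | verify_coding_theorem
-- ===== SOURCE A (Python) =====
-- def verify_coding_theorem(text, encoded_text, huffman_dict):
--     decoded_text = ""
--     current_code = ""
--     for bit in encoded_text:
--         current_code += bit
--         for sym, code in huffman_dict.items():
--             if current_code == code:
--                 decoded_text += sym
--                 current_code = ""
--                 break
--     return text == decoded_text
-- ===== SOURCE B (Python) =====
-- def verify_coding_theorem(text, encoded_text, huffman_dict):
--     # Decode by walking a ternary search trie of the codes (first entry wins on
--     # duplicate codes); the per-bit state is a trie node, not a prefix string.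
--     def single(ks, v):
--         if len(ks) == 1:
--             return (ks[0], v, None, None, None)
--         return (ks[0], None, None, single(ks[1:], v), None)
--
--     def insert(t, ks, v):
--         if t is None:
--             return single(ks, v)
--         c, val, lo, eq, hi = t
--         k = ks[0]
--         if k < c:
--             return (c, val, insert(lo, ks, v), eq, hi)
--         if c < k:
--             return (c, val, lo, eq, insert(hi, ks, v))
--         if len(ks) == 1:
--             return (c, val if val is not None else v, lo, eq, hi)
--         return (c, val, lo, insert(eq, ks[1:], v), hi)
--
--     root = None
--     for sym, code in huffman_dict.items():
--         if code:
--             root = insert(root, code, sym)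
--
--     def find_node(t, b):
--         while t is not None:
--             c, val, lo, eq, hi = t
--             if b < c:
--                 t = lo
--             elif c < b:
--                 t = hi
--             else:
--                 return (val, eq)
--         return None
--
--     decoded = []
--     node = root
--     for bit in encoded_text:
--         hit = find_node(node, bit)
--         if hit is None:
--             node = None          # prefix left the trie: can never match again
--         elif hit[0] is not None:
--             decoded.append(hit[0])
--             node = root
--         else:
--             node = hit[1]
--     return text == "".join(decoded)
-- ===== Notes on version B (the rewrite author's own statement) =====
-- stated objective: faster
-- what changed: B builds a ternary search trie of the codes once and decodes by walking the trie node-by-node per bit (with a permanent dead state once the prefix leaves the trie), replacing A's per-bit linear scan of the whole dict against an accumulated prefix string.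
import Mathlib
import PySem

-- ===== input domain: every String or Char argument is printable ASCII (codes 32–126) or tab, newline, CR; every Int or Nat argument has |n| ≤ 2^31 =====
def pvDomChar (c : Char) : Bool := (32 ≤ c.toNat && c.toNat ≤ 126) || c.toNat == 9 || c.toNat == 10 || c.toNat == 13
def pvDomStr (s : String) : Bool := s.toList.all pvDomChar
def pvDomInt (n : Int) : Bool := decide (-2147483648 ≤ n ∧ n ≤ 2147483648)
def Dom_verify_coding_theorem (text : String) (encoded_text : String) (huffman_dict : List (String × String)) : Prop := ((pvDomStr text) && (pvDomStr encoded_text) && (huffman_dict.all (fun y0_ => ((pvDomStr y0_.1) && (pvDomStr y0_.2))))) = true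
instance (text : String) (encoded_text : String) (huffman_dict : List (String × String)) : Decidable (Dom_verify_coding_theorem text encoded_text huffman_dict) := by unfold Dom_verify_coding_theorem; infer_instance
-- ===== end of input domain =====

-- B decodes by walking a ternary search trie of the codes instead of A's per-bit
-- linear scan of the dict against an accumulated prefix string; faster (asymptotic).

-- ===== PORT A =====
-- inner 'for sym, code in huffman_dict.items(): if current_code == code: … break'
def findSymA : List (String × String) → String → Option String
  | [], _ => none
  | (sym, code) :: rest, c => if c == code then some sym else findSymA rest c

def verify_coding_theorem (text : String) (encoded_text : String) (huffman_dict : List (String × String)) : Bool :=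
  let entries := (PySem.Dict.ofList huffman_dict).items
  let res := encoded_text.toList.foldl (fun st bit =>
    let cur := st.2.push bit
    match findSymA entries cur with
    | some sym => (st.1 ++ sym, "")
    | none => (st.1, cur)) ("", "")
  text == res.1

-- ===== PORT B =====
-- ternary search trie node: (char, optional symbol, lo, eq, hi); TST.nil = Python None
inductive TST
  | nil
  | node (c : Char) (val : Option String) (lo eq hi : TST)

-- Python 'single(ks, v)' (chain for a fresh code); ks = [] is unreachable in B
def TST.single : List Char → String → TST
  | [], _ => .nil
  | [c], v => .node c (some v) .nil .nil .nil
  | c :: cs, v => .node c none .nil (TST.single cs v) .nil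

-- Python 'insert(t, ks, v)'; ks = [] is unreachable in B (empty codes are skipped)
def TST.insert : TST → List Char → String → TST
  | .nil, ks, v => TST.single ks v
  | .node c val lo eq hi, [], _ => .node c val lo eq hi
  | .node c val lo eq hi, k :: ks', v =>
    if k < c then .node c val (TST.insert lo (k :: ks') v) eq hi
    else if c < k then .node c val lo eq (TST.insert hi (k :: ks') v)
    else match ks' with
      | [] => .node c (some (val.getD v)) lo eq hi   -- 'val if val is not None else v'
      | _ :: _ => .node c val lo (TST.insert eq ks' v) hi

-- Python 'find_node(t, b)' (the while loop over lo/hi links)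
def TST.findNode : TST → Char → Option (Option String × TST)
  | .nil, _ => none
  | .node c val lo eq hi, b =>
    if b < c then TST.findNode lo b
    else if c < b then TST.findNode hi b
    else some (val, eq)

-- 'root = None; for sym, code in huffman_dict.items(): if code: root = insert(root, code, sym)'
def buildTrie (entries : List (String × String)) : TST :=
  entries.foldl (fun t p => if p.2.isEmpty then t else TST.insert t p.2.toList p.1) .nil

def verify_coding_theorem_alt (text : String) (encoded_text : String) (huffman_dict : List (String × String)) : Bool :=
  let root := buildTrie (PySem.Dict.ofList huffman_dict).items
  let res := encoded_text.toList.foldl (fun st bit =>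
    match TST.findNode st.2 bit with
    | none => (st.1, TST.nil)
    | some (some sym, _) => (st.1 ++ [sym], root)
    | some (none, eq) => (st.1, eq)) (([] : List String), root)
  text == String.join res.1

-- ===== PRECONDITION & SPEC =====
def Spec_verify_coding_theorem (text : String) (encoded_text : String) (huffman_dict : List (String × String)) (out : Bool) : Prop := out = verify_coding_theorem_alt text encoded_text huffman_dict
instance (text : String) (encoded_text : String) (huffman_dict : List (String × String)) (out : Bool) : Decidable (Spec_verify_coding_theorem text encoded_text huffman_dict out) := by unfold Spec_verify_coding_theorem; infer_instance

-- ===== CLAIM (what is proved, stated in full; the proofs are below) =====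
def Claim_equal_verify_coding_theorem : Prop := ∀ (text : String) (encoded_text : String) (huffman_dict : List (String × String)), Dom_verify_coding_theorem text encoded_text huffman_dict → Spec_verify_coding_theorem text encoded_text huffman_dict (verify_coding_theorem text encoded_text huffman_dict)

-- ===== LEMMAS AND PROOFS =====

-- subtree of t reached by following a path of characters (proof-only notion)
def TST.sub : TST → List Char → TST
  | t, [] => t
  | t, c :: cs =>
    match TST.findNode t c with
    | some (_, eq) => TST.sub eq cs
    | none => .nil

-- symbol stored at a path (proof-only notion)
def TST.lookup : TST → List Char → Option String
  | _, [] => none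
  | t, [c] =>
    match TST.findNode t c with
    | none => none
    | some (v, _) => v
  | t, c :: cs =>
    match TST.findNode t c with
    | none => none
    | some (_, eq) => TST.lookup eq cs

theorem TST.lookup_nil (ks : List Char) : TST.lookup .nil ks = none := by
  match ks with
  | [] => rfl
  | [c] => rfl
  | c :: d :: cs => rfl

theorem TST.sub_nil (ks : List Char) : TST.sub .nil ks = .nil := by
  match ks with
  | [] => rfl
  | c :: cs => simp [TST.sub, TST.findNode]

theorem TST.sub_append (t : TST) (p q : List Char) :
    TST.sub t (p ++ q) = TST.sub (TST.sub t p) q := by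
  induction p generalizing t with
  | nil => rfl
  | cons c cs ih =>
    simp only [List.cons_append, TST.sub]
    cases h : TST.findNode t c with
    | none => simp [TST.sub_nil]
    | some pr => exact ih pr.2

theorem TST.lookup_append (t : TST) (p q : List Char) (hq : q ≠ []) :
    TST.lookup t (p ++ q) = TST.lookup (TST.sub t p) q := by
  induction p generalizing t with
  | nil => rfl
  | cons c cs ih =>
    cases hcq : cs ++ q with
    | nil => exact absurd (List.append_eq_nil_iff.mp hcq).2 hq
    | cons d ds =>
      simp only [List.cons_append, hcq, TST.lookup, TST.sub]
      cases h : TST.findNode t c with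
      | none => simp [TST.lookup_nil]
      | some pr =>
        obtain ⟨v, eq⟩ := pr
        rw [← hcq]
        exact ih eq

theorem TST.findNode_single (ks : List Char) (v : String) (b : Char) (hk : ks ≠ []) :
    TST.findNode (TST.single ks v) b =
      if b = ks.head! then
        some (if ks.tail = [] then (some v, TST.nil) else (none, TST.single ks.tail v))
      else none := by
  match ks with
  | [] => exact absurd rfl hk
  | [c] =>
    simp only [TST.single, TST.findNode, List.head!, List.tail]
    rcases lt_trichotomy b c with h | h | h
    · simp [h, h.ne, TST.findNode]
    · simp [h, h ▸ lt_irrefl b]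
    · simp [h, h.ne', not_lt_of_gt h, TST.findNode]
  | c :: d :: cs =>
    simp only [TST.single, TST.findNode, List.head!, List.tail]
    rcases lt_trichotomy b c with h | h | h
    · simp [h, h.ne, TST.findNode]
    · simp [h, h ▸ lt_irrefl b]
    · simp [h, h.ne', not_lt_of_gt h, TST.findNode]

theorem TST.findNode_insert (t : TST) (k : Char) (ks' : List Char) (v : String) (b : Char) :
    TST.findNode (TST.insert t (k :: ks') v) b =
      if b = k then
        some (match ks', TST.findNode t k with
          | [], none => (some v, TST.nil)
          | [], some (val, eq) => (some (val.getD v), eq)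
          | _ :: _, none => (none, TST.single ks' v)
          | _ :: _, some (val, eq) => (val, TST.insert eq ks' v))
      else TST.findNode t b := by
  induction t with
  | nil =>
    rw [show TST.insert .nil (k :: ks') v = TST.single (k :: ks') v from rfl]
    rw [TST.findNode_single (k :: ks') v b (by simp)]
    cases ks' <;> simp [TST.findNode]
  | node c val lo eq hi ihlo iheq ihhi =>
    simp only [TST.insert]
    rcases lt_trichotomy k c with hkc | hkc | hkc
    · simp only [hkc, if_pos]
      simp only [TST.findNode]
      rcases lt_trichotomy b c with hbc | hbc | hbc
      · simp [hbc, hkc, ihlo]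
      · subst hbc
        have : ¬ b = k := fun h => absurd (h ▸ hkc) (lt_irrefl b)
        simp [this, lt_irrefl]
      · have : ¬ b = k := fun h => absurd hkc (by rw [← h]; exact not_lt_of_gt hbc)
        simp [not_lt_of_gt hbc, hbc, this]
    · subst hkc
      simp only [lt_irrefl, if_false]
      cases ks' with
      | nil =>
        simp only [TST.findNode]
        rcases lt_trichotomy b k with hbc | hbc | hbc
        · simp [hbc, hbc.ne]
        · subst hbc; simp [lt_irrefl]
        · simp [not_lt_of_gt hbc, hbc, hbc.ne']
      | cons d ds =>
        simp only [TST.findNode]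
        rcases lt_trichotomy b k with hbc | hbc | hbc
        · simp [hbc, hbc.ne]
        · subst hbc; simp [lt_irrefl]
        · simp [not_lt_of_gt hbc, hbc, hbc.ne']
    · have hnk : ¬ k < c := not_lt_of_gt hkc
      simp only [hnk, if_false, hkc, if_pos]
      simp only [TST.findNode]
      rcases lt_trichotomy b c with hbc | hbc | hbc
      · have : ¬ b = k := fun h => absurd hkc (by rw [← h]; exact not_lt_of_gt hbc)
        simp [hbc, this]
      · subst hbc
        have : ¬ b = k := fun h => absurd (h ▸ hkc) (lt_irrefl b)
        simp [this, lt_irrefl]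
      · simp [not_lt_of_gt hbc, hbc, hkc, hnk, ihhi]

theorem TST.lookup_single (ks key : List Char) (v : String) (hk : ks ≠ []) (hkey : key ≠ []) :
    TST.lookup (TST.single ks v) key = if key = ks then some v else none := by
  induction ks generalizing key with
  | nil => exact absurd rfl hk
  | cons k ks' ih =>
    match key with
    | [] => exact absurd rfl hkey
    | [d] =>
      rw [show TST.lookup (TST.single (k :: ks') v) [d] =
        (match TST.findNode (TST.single (k :: ks') v) d with
          | none => none | some (v, _) => v) from rfl]
      rw [TST.findNode_single (k :: ks') v d (by simp)]
      by_cases hdk : d = k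
      · subst hdk
        cases ks' with
        | nil => simp
        | cons e es => simp
      · simp only [List.head!, hdk, if_false]
        simp [hdk]
    | d :: e :: ds =>
      rw [show TST.lookup (TST.single (k :: ks') v) (d :: e :: ds) =
        (match TST.findNode (TST.single (k :: ks') v) d with
          | none => none | some (_, eq) => TST.lookup eq (e :: ds)) from rfl]
      rw [TST.findNode_single (k :: ks') v d (by simp)]
      by_cases hdk : d = k
      · subst hdk
        cases ks' with
        | nil =>
          simp [TST.lookup_nil]
        | cons f fs =>
          simp [ih (e :: ds) (by simp) (by simp)]
      · simp only [List.head!, hdk, if_false]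
        simp [hdk]

theorem TST.lookup_insert (t : TST) (ks key : List Char) (v : String)
    (hk : ks ≠ []) (hkey : key ≠ []) :
    TST.lookup (TST.insert t ks v) key =
      if key = ks ∧ TST.lookup t key = none then some v else TST.lookup t key := by
  match ks, hk with
  | k :: ks', _ =>
  induction key generalizing t k ks' with
  | nil => exact absurd rfl hkey
  | cons d ds ih =>
    cases ds with
    | nil =>
      rw [show ∀ u, TST.lookup u [d] =
        (match TST.findNode u d with | none => none | some (v, _) => v) from fun _ => rfl,
        show ∀ u, TST.lookup u [d] =
        (match TST.findNode u d with | none => none | some (v, _) => v) from fun _ => rfl]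
      rw [TST.findNode_insert t k ks' v d]
      by_cases hdk : d = k
      · subst hdk
        cases ks' with
        | nil =>
          cases h : TST.findNode t d with
          | none => simp [h]
          | some pr =>
            obtain ⟨val, eq⟩ := pr
            cases val <;> simp [h]
        | cons e es =>
          have hne : ¬ ([d] = d :: e :: es) := by simp
          cases h : TST.findNode t d with
          | none => simp [h, hne]
          | some pr => obtain ⟨val, eq⟩ := pr; simp [h, hne]
      · have hne : ¬ ([d] = k :: ks') := by simp [hdk]
        simp [hdk, hne]
    | cons e es =>
      rw [show ∀ u, TST.lookup u (d :: e :: es) =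
        (match TST.findNode u d with | none => none | some (_, eq) => TST.lookup eq (e :: es)) from fun _ => rfl,
        show ∀ u, TST.lookup u (d :: e :: es) =
        (match TST.findNode u d with | none => none | some (_, eq) => TST.lookup eq (e :: es)) from fun _ => rfl]
      rw [TST.findNode_insert t k ks' v d]
      by_cases hdk : d = k
      · subst hdk
        cases ks' with
        | nil =>
          have hne : ¬ (d :: e :: es = [d]) := by simp
          cases h : TST.findNode t d with
          | none => simp [h, hne, TST.lookup_nil]
          | some pr => obtain ⟨val, eq⟩ := pr; simp [h, hne]
        | cons f fs =>
          cases h : TST.findNode t d with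
          | none =>
            simp only [h]
            simp [TST.lookup_single (f :: fs) (e :: es) v (by simp) (by simp)]
          | some pr =>
            obtain ⟨val, eq⟩ := pr
            simp only [h, if_true]
            rw [ih eq (by simp) f fs (by simp)]
            simp
      · have hne : ¬ (d :: e :: es = k :: ks') := by simp [hdk]
        simp [hdk, hne]

-- the trie's lookup is exactly A's first-match scan of the entries
theorem lookup_buildTrie_aux (entries : List (String × String)) (t : TST) (key : List Char)
    (hkey : key ≠ []) :
    TST.lookup (entries.foldl (fun t p => if p.2.isEmpty then t else TST.insert t p.2.toList p.1) t) key =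
      match TST.lookup t key with
      | some s => some s
      | none => findSymA entries (String.ofList key) := by
  induction entries generalizing t with
  | nil =>
    simp only [List.foldl_nil, findSymA]
    cases TST.lookup t key <;> rfl
  | cons p rest ih =>
    obtain ⟨sym, code⟩ := p
    simp only [List.foldl_cons]
    by_cases hc : code.isEmpty
    · have hcode : code = "" := String.isEmpty_iff.mp hc
      subst hcode
      simp only [hc, if_true]
      rw [ih t]
      have hne : (String.ofList key == "") = false := by
        rw [beq_eq_false_iff_ne]
        intro hcontra
        exact hkey (by simpa [String.ext_iff] using hcontra)
      cases TST.lookup t key with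
      | some s => rfl
      | none =>
        simp only [findSymA]
        rw [hne]
        simp only [Bool.false_eq_true, if_false]
    · simp only [hc, Bool.false_eq_true, if_false]
      rw [ih]
      have hcodene : code.toList ≠ [] := by
        intro hnil
        apply hc
        rw [String.isEmpty_iff, String.ext_iff]
        rw [hnil, String.toList_empty]
      rw [TST.lookup_insert t code.toList key sym hcodene hkey]
      by_cases hkc : key = code.toList
      · have hstr : (String.ofList key == code) = true := by
          rw [beq_iff_eq, String.ext_iff]
          simpa using hkc
        cases h : TST.lookup t key with
        | none => simp [hkc, findSymA, hstr]
        | some s => simp [hkc, h]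
      · have hstr : ¬ (String.ofList key == code) = true := by
          rw [beq_iff_eq, String.ext_iff]
          simpa using hkc
        cases h : TST.lookup t key with
        | none => simp [hkc, findSymA, hstr]
        | some s => simp [hkc, h]

theorem lookup_buildTrie (entries : List (String × String)) (key : List Char) (hkey : key ≠ []) :
    TST.lookup (buildTrie entries) key = findSymA entries (String.ofList key) := by
  unfold buildTrie
  rw [lookup_buildTrie_aux entries .nil key hkey, TST.lookup_nil]

theorem join_append (l : List String) (s : String) :
    String.join (l ++ [s]) = String.join l ++ s := by
  simp [String.join, List.foldl_append]

-- main invariant: B's per-bit state is the subtrie at A's accumulated prefix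
theorem fold_inv (entries : List (String × String)) (bs : List Char)
    (decA : String) (decB : List String) (cur : String)
    (hdec : String.join decB = decA) :
    String.join (bs.foldl (fun st bit =>
      match TST.findNode st.2 bit with
      | none => (st.1, TST.nil)
      | some (some sym, _) => (st.1 ++ [sym], buildTrie entries)
      | some (none, eq) => (st.1, eq)) (decB, TST.sub (buildTrie entries) cur.toList)).1 =
    (bs.foldl (fun st bit =>
      let c := st.2.push bit
      match findSymA entries c with
      | some sym => (st.1 ++ sym, "")
      | none => (st.1, c)) (decA, cur)).1 := by
  induction bs generalizing decA decB cur with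
  | nil => simpa using hdec
  | cons b bs ih =>
    simp only [List.foldl_cons]
    have hlk : TST.lookup (TST.sub (buildTrie entries) cur.toList) [b] =
        findSymA entries (cur.push b) := by
      rw [← TST.lookup_append (buildTrie entries) cur.toList [b] (by simp)]
      rw [lookup_buildTrie entries (cur.toList ++ [b]) (by simp)]
      congr 1
      apply String.ext
      simp
    have hsub : TST.sub (buildTrie entries) (cur.push b).toList =
        TST.sub (TST.sub (buildTrie entries) cur.toList) [b] := by
      rw [show (cur.push b).toList = cur.toList ++ [b] by simp]
      exact TST.sub_append _ _ _
    rw [show ∀ u, TST.lookup u [b] =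
      (match TST.findNode u b with | none => none | some (v, _) => v) from fun _ => rfl] at hlk
    cases h : TST.findNode (TST.sub (buildTrie entries) cur.toList) b with
    | none =>
      rw [h] at hlk
      have hh := ih decA decB (cur.push b) hdec
      rw [hsub, show TST.sub (TST.sub (buildTrie entries) cur.toList) [b] = TST.nil from by
        simp [TST.sub, h]] at hh
      simpa [h, ← hlk] using hh
    | some pr =>
      obtain ⟨val, eq⟩ := pr
      rw [h] at hlk
      cases val with
      | some sym =>
        have hh := ih (decA ++ sym) (decB ++ [sym]) "" (by rw [join_append, hdec])
        rw [show ("" : String).toList = [] from by simp,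
          show ∀ u : TST, TST.sub u [] = u from fun _ => rfl] at hh
        simpa [h, ← hlk] using hh
      | none =>
        have hh := ih decA decB (cur.push b) hdec
        rw [hsub, show TST.sub (TST.sub (buildTrie entries) cur.toList) [b] = eq from by
          simp [TST.sub, h]] at hh
        simpa [h, ← hlk] using hh

-- ===== VERDICT (by name: the statement is the Claim_ definition above) =====
theorem verify_coding_theorem_spec : Claim_equal_verify_coding_theorem := by
  intro text encoded_text huffman_dict _
  unfold Spec_verify_coding_theorem verify_coding_theorem verify_coding_theorem_alt
  have h := fold_inv ((PySem.Dict.ofList huffman_dict).items) encoded_text.toList "" [] "" rfl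
  rw [show ("" : String).toList = [] from by simp,
    show ∀ u : TST, TST.sub u [] = u from fun _ => rfl] at h
  simp only [← h]
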